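-- pv_equiv track=rewrite | github.com/jsboige/CoursIA | slides/S4-trading-algorithmique/analysis/compare_slides_s4.py | format_slide_list
-- ===== SOURCE A (Python) =====
-- from typing import Dict, List, Tuple
--
-- def format_slide_list(slides: List[int]) -> str:
--     """Formate une liste de numéros de slides en plage compacte."""
--     if not slides:
--         return "Aucune"
--
--     slides = sorted(set(slides))
--     ranges = []
--     start = slides[0]
--     end = slides[0]
--
--     for i in range(1, len(slides)):
--         if slides[i] == end + 1:
--             end = slides[i]
--         else:
--             ranges.append(f"{start}" if start == end else f"{start}-{end}")
--             start = slides[i]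
--             end = slides[i]
--
--     ranges.append(f"{start}" if start == end else f"{start}-{end}")
--
--     # Limiter la longueur
--     result = ", ".join(ranges)
--     if len(result) > 100:
--         return result[:100] + "..."
--     return result
-- ===== SOURCE B (Python) =====
-- from itertools import groupby
--
-- def format_slide_list(slides):
--     """Formate une liste de numéros de slides en plage compacte."""
--     if not slides:
--         return "Aucune"
--     xs = sorted(set(slides))
--     parts = []
--     for _, grp in groupby(enumerate(xs), key=lambda iv: iv[1] - iv[0]):
--         run = list(grp)
--         start, end = run[0][1], run[-1][1]
--         parts.append(f"{start}" if start == end else f"{start}-{end}")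
--     result = ", ".join(parts)
--     if len(result) > 100:
--         return result[:100] + "..."
--     return result
-- ===== Notes on version B (the rewrite author's own statement) =====
-- stated objective: idiomatic
-- what changed: A's manual start/end accumulator loop over indices is replaced by itertools.groupby(enumerate(xs), key=lambda iv: iv[1]-iv[0]), which partitions the sorted unique slides into consecutive runs directly; each run is formatted from its first and last element.
import Mathlib
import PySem

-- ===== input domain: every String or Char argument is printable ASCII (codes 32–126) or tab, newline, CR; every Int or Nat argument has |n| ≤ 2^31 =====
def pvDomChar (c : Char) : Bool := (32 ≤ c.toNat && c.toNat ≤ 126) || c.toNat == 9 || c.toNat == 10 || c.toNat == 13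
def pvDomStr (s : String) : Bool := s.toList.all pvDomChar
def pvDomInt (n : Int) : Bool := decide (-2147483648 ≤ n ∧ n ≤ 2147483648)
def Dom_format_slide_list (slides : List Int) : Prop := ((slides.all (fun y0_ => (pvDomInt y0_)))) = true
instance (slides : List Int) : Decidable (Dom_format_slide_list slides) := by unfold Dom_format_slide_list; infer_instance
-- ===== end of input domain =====

-- B replaces A's manual start/end loop with itertools.groupby over enumerate(xs) keyed on value-index
-- (runs of consecutive ints share a key); objective: idiomatic. Same return value everywhere; A is total.

-- ===== PORT A =====
-- shared f-string formatter: f"{start}" if start == end else f"{start}-{end}"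
def fmtRange (s e : Int) : String :=
  if s = e then PySem.Int.toStr s else PySem.Int.toStr s ++ "-" ++ PySem.Int.toStr e

-- body of A's for-loop; state = (ranges, start, end), v = slides[i]
def stepA (st : List String × Int × Int) (v : Int) : List String × Int × Int :=
  if v = st.2.2 + 1 then (st.1, st.2.1, v)
  else (st.1 ++ [fmtRange st.2.1 st.2.2], v, v)

def format_slide_list (slides : List Int) : String :=
  if slides = [] then "Aucune"
  else
    let ys := PySem.List.sorted (PySem.Set.ofList slides) (fun x => x) false
    let start := PySem.List.pyGetD ys 0 0
    let st := (PySem.List.pyRange 1 (ys.length : Int) 1).foldl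
      (fun st i => stepA st (PySem.List.pyGetD ys i 0)) ([], start, start)
    let ranges := st.1 ++ [fmtRange st.2.1 st.2.2]
    let result := PySem.Str.join ", " ranges
    if 100 < PySem.Str.len result then PySem.Str.slice result none (some 100) ++ "..." else result

-- ===== PORT B =====
-- itertools.groupby(enumerate(xs), key=lambda iv: iv[1]-iv[0]): maximal blocks of equal adjacent keys
def gbRuns : List (Int × Int) → List (List (Int × Int))
  | [] => []
  | p :: rest =>
    match gbRuns rest with
    | [] => [[p]]
    | [] :: gs => [p] :: gs
    | (q :: g) :: gs =>
      if p.2 - p.1 = q.2 - q.1 then (p :: q :: g) :: gs else [p] :: (q :: g) :: gs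

def format_slide_list_alt (slides : List Int) : String :=
  if slides = [] then "Aucune"
  else
    let xs := PySem.List.sorted (PySem.Set.ofList slides) (fun x => x) false
    let parts := (gbRuns (PySem.List.enumerate xs 0)).map
      (fun run => fmtRange (run.headD (0, 0)).2 (run.getLastD (0, 0)).2)
    let result := PySem.Str.join ", " parts
    if 100 < PySem.Str.len result then PySem.Str.slice result none (some 100) ++ "..." else result

-- ===== PRECONDITION & SPEC =====
def Spec_format_slide_list (slides : List Int) (out : String) : Prop := out = format_slide_list_alt slides
instance (slides : List Int) (out : String) : Decidable (Spec_format_slide_list slides out) := by unfold Spec_format_slide_list; infer_instance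

-- ===== CLAIM (what is proved, stated in full; the proofs are below) =====
def Claim_equal_format_slide_list : Prop := ∀ (slides : List Int), Dom_format_slide_list slides → Spec_format_slide_list slides (format_slide_list slides)

-- ===== LEMMAS AND PROOFS =====
def runs : List Int → List (Int × Int)
  | [] => []
  | x :: t =>
    match runs t with
    | [] => [(x, x)]
    | (s, e) :: rs => if s = x + 1 then (x, e) :: rs else (x, x) :: (s, e) :: rs
def mergeR (s e : Int) (t : List Int) : List (Int × Int) :=
  match runs t with
  | [] => [(s, e)]
  | (s', e') :: rs => if s' = e + 1 then (s, e') :: rs else (s, e) :: (s', e') :: rs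
lemma mergeR_self (y : Int) (t : List Int) : mergeR y y t = runs (y :: t) := by
  simp only [mergeR, runs]
lemma mergeR_cons (s e y : Int) (t : List Int) :
    mergeR s e (y :: t) = if y = e + 1 then mergeR s y t else (s, e) :: runs (y :: t) := by
  cases h : runs t with
  | nil =>
    simp only [mergeR, runs, h]
  | cons p rs =>
    obtain ⟨s', e'⟩ := p
    simp only [mergeR, runs, h]
    split_ifs <;> simp_all
def finishA (st : List String × Int × Int) : List String := st.1 ++ [fmtRange st.2.1 st.2.2]
lemma loopA (t : List Int) : ∀ (acc : List String) (s e : Int),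
    finishA (t.foldl stepA (acc, s, e)) = acc ++ (mergeR s e t).map (fun r => fmtRange r.1 r.2) := by
  induction t with
  | nil => intro acc s e; simp [finishA, mergeR, runs]
  | cons y t ih =>
    intro acc s e
    rw [List.foldl_cons, mergeR_cons]
    by_cases hy : y = e + 1
    · rw [if_pos hy]
      have : stepA (acc, s, e) y = (acc, s, y) := by simp [stepA, hy]
      rw [this, ih]
    · rw [if_neg hy, ← mergeR_self]
      have : stepA (acc, s, e) y = (acc ++ [fmtRange s e], y, y) := by simp [stepA, hy]
      rw [this, ih]
      simp
def pairOf (run : List (Int × Int)) : Int × Int :=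
  ((run.headD ((0 : Int), (0 : Int))).2, (run.getLastD (0, 0)).2)
lemma gbRuns_head (p : Int × Int) (l : List (Int × Int)) :
    ∃ g gs, gbRuns (p :: l) = (p :: g) :: gs := by
  cases hl : gbRuns l with
  | nil => exact ⟨[], [], by simp [gbRuns, hl]⟩
  | cons g gs =>
    cases g with
    | nil => exact ⟨[], gs, by simp [gbRuns, hl]⟩
    | cons q g' =>
      by_cases h : p.2 - p.1 = q.2 - q.1
      · exact ⟨q :: g', gs, by simp [gbRuns, hl, h]⟩
      · exact ⟨[], (q :: g') :: gs, by simp [gbRuns, hl, h]⟩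
lemma gbRuns_cons_eq (p q : Int × Int) (l : List (Int × Int)) (g : List (Int × Int))
    (gs : List (List (Int × Int))) (h : gbRuns (q :: l) = (q :: g) :: gs) :
    gbRuns (p :: q :: l)
      = if p.2 - p.1 = q.2 - q.1 then (p :: q :: g) :: gs else [p] :: (q :: g) :: gs := by
  conv_lhs => rw [gbRuns.eq_def]
  simp only [h]

lemma runs_cons_eq (x s' e' : Int) (t : List Int) (rs : List (Int × Int))
    (h : runs t = (s', e') :: rs) :
    runs (x :: t) = if s' = x + 1 then (x, e') :: rs else (x, x) :: (s', e') :: rs := by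
  conv_lhs => rw [runs.eq_def]
  simp only [h]

lemma gbRuns_pairs (t : List Int) : ∀ (i : Int),
    (gbRuns (PySem.List.enumerate t i)).map pairOf = runs t := by
  induction t with
  | nil => intro i; simp [gbRuns, runs]
  | cons x r ih =>
    intro i
    cases r with
    | nil => simp [gbRuns, runs, pairOf]
    | cons y t' =>
      rw [PySem.List.enumerate_cons, PySem.List.enumerate_cons]
      obtain ⟨g, gs, hg⟩ := gbRuns_head ((i : Int) + 1, y) (PySem.List.enumerate t' (i + 1 + 1))
      have ih' := ih (i + 1)
      rw [PySem.List.enumerate_cons, hg, List.map_cons] at ih'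
      have hr : runs (y :: t') = (y, (List.getLastD g ((i : Int) + 1, y)).2) :: List.map pairOf gs := by
        rw [← ih']
        simp only [pairOf, List.headD_cons, List.getLastD_cons]
      rw [gbRuns_cons_eq _ _ _ _ _ hg, runs_cons_eq x y _ _ _ hr, apply_ite (List.map pairOf)]
      split_ifs with h1 h2 <;> [skip; (exfalso; simp at h1; omega); (exfalso; simp at h1; omega); skip] <;>
        simp only [pairOf, List.map_cons, List.headD_cons, List.getLastD_cons, List.getLastD_nil]

lemma ranges_eq (x : Int) (t : List Int) :
    finishA (t.foldl stepA ([], x, x))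
      = (gbRuns (PySem.List.enumerate (x :: t) 0)).map
          (fun run => fmtRange (run.headD (0, 0)).2 (run.getLastD (0, 0)).2) := by
  rw [loopA, mergeR_self, ← gbRuns_pairs (x :: t) 0, List.map_map]
  rfl

-- ===== VERDICT (by name: the statement is the Claim_ definition above) =====
theorem format_slide_list_spec : Claim_equal_format_slide_list := by
  intro slides _
  unfold Spec_format_slide_list format_slide_list format_slide_list_alt
  by_cases hnil : slides = []
  · simp [hnil]
  · rw [if_neg hnil, if_neg hnil]
    have hne : PySem.List.sorted (PySem.Set.ofList slides) (fun x => x) false ≠ [] := by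
      rw [Ne, PySem.List.sorted_eq_nil_iff]
      intro h
      rcases slides with _ | ⟨a, l⟩
      · exact hnil rfl
      · have : a ∈ PySem.Set.ofList (a :: l) := by
          rw [PySem.Set.mem_ofList]; exact List.mem_cons_self
        rw [h] at this
        exact absurd this (List.not_mem_nil)
    obtain ⟨x, t, hxt⟩ := List.exists_cons_of_ne_nil hne
    simp only [hxt]
    rw [show PySem.List.pyGetD (x :: t) 0 0 = x by simp [pysem]]
    rw [PySem.List.foldl_pyRange_pyGetD' (x :: t) 0 stepA ([], x, x) (by norm_num : (0 : Int) ≤ 1)]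
    simp only [Int.toNat_one, List.drop_succ_cons, List.drop_zero]
    rw [show (t.foldl stepA ([], x, x)).1 ++ [fmtRange (t.foldl stepA ([], x, x)).2.1 (t.foldl stepA ([], x, x)).2.2] = finishA (t.foldl stepA ([], x, x)) from rfl]
    rw [ranges_eq]
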